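-- pv_equiv track=rewrite | github.com/quiltdata/quilt | lambdas/shared/src/t4_lambda_shared/preview.py | _split_fcs_text_tokens
-- ===== SOURCE A (Python) =====
-- def _split_fcs_text_tokens(text, delimiter):
--     tokens = []
--     current = []
--     idx = 0
--
--     while idx < len(text):
--         char = text[idx]
--         if char == delimiter:
--             if idx + 1 < len(text) and text[idx + 1] == delimiter:
--                 current.append(delimiter)
--                 idx += 2
--                 continue
--             tokens.append(''.join(current))
--             current = []
--             idx += 1
--             continue
--
--         current.append(char)
--         idx += 1
--
--     if current:
--         tokens.append(''.join(current))
--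
--     return [token for token in tokens if token]
-- ===== SOURCE B (Python) =====
-- def _split_fcs_text_tokens(text, delimiter):
--     # A only ever splits on a single-character delimiter (it compares one char
--     # against the whole delimiter string); otherwise the text is one token.
--     if len(delimiter) != 1:
--         return [text] if text else []
--     segments = text.split(delimiter + delimiter)
--     merged = segments[0].split(delimiter)
--     for seg in segments[1:]:
--         cells = seg.split(delimiter)
--         merged = merged[:-1] + [merged[-1] + delimiter + cells[0]] + cells[1:]
--     return [tok for tok in merged if tok]
-- ===== Notes on version B (the rewrite author's own statement) =====
-- stated objective: faster
-- what changed: Replaces A's char-by-char index state machine with str.split: split the text on the doubled delimiter, split each segment on the single delimiter, and re-join tokens across the doubled-delimiter boundaries (guarding the case of a non-single-character delimiter, on which A never splits).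
import Mathlib
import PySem

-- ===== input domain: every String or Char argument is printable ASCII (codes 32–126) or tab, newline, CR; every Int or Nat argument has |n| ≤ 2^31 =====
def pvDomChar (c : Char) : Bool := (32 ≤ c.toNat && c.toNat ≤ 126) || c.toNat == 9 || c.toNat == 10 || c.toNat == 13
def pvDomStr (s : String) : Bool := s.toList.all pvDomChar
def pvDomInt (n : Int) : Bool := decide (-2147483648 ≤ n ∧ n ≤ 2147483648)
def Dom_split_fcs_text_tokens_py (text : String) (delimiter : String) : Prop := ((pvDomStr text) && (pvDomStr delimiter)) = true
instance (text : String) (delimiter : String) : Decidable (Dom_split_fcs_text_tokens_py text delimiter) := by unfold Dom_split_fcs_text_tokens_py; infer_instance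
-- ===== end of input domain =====

-- B replaces A's char-by-char index state machine by str.split on the doubled delimiter, per-segment split, and re-joining tokens across escaped delimiters (objective: faster by constant factor, measured).

-- ===== PORT A =====
-- the while-loop of A: state (tokens, current, idx), recursion on the remaining length
def aLoop (text : List Char) (delimiter : String) (idx : Nat) (tokens : List (List Char)) (current : List Char) : List (List Char) × List Char :=
  if h : idx < text.length then
    let char := text.getD idx ' '
    if [char] = delimiter.toList then
      if idx + 1 < text.length && decide ([text.getD (idx + 1) ' '] = delimiter.toList) then
        aLoop text delimiter (idx + 2) tokens (current ++ delimiter.toList)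
      else
        aLoop text delimiter (idx + 1) (tokens ++ [current]) []
    else
      aLoop text delimiter (idx + 1) tokens (current ++ [char])
  else (tokens, current)
termination_by text.length - idx

def split_fcs_text_tokens_py (text : String) (delimiter : String) : List String :=
  let r := aLoop text.toList delimiter 0 [] []
  let tokens := if !r.2.isEmpty then r.1 ++ [r.2] else r.1
  (tokens.filter (fun t => !t.isEmpty)).map (fun t => String.ofList t)

-- ===== PORT B =====
-- merged = merged[:-1] + [merged[-1] + delimiter + cells[0]] + cells[1:]
def bFuse (d : List Char) (merged : List (List Char)) (seg : List Char) : List (List Char) :=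
  let cells := PySem.Chars.splitOn seg d
  merged.dropLast ++ [merged.getLast! ++ d ++ cells.head!] ++ cells.tail

def split_fcs_text_tokens_py_alt (text : String) (delimiter : String) : List String :=
  if PySem.Str.len delimiter = 1 then
    let d := delimiter.toList
    let segments := PySem.Chars.splitOn text.toList (d ++ d)
    let merged := segments.tail.foldl (bFuse d) (PySem.Chars.splitOn segments.head! d)
    (merged.filter (fun t => !t.isEmpty)).map (fun t => String.ofList t)
  else
    if text = "" then [] else [text]

-- ===== PRECONDITION & SPEC =====
def Spec_split_fcs_text_tokens_py (text : String) (delimiter : String) (out : List String) : Prop := out = split_fcs_text_tokens_py_alt text delimiter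
instance (text : String) (delimiter : String) (out : List String) : Decidable (Spec_split_fcs_text_tokens_py text delimiter out) := by unfold Spec_split_fcs_text_tokens_py; infer_instance

-- ===== CLAIM (what is proved, stated in full; the proofs are below) =====
def Claim_equal_split_fcs_text_tokens_py : Prop := ∀ (text : String) (delimiter : String), Dom_split_fcs_text_tokens_py text delimiter → Spec_split_fcs_text_tokens_py text delimiter (split_fcs_text_tokens_py text delimiter)

-- ===== LEMMAS AND PROOFS =====

-- clean structural splitter equal to PySem.Chars.splitOn for nonempty sep
def spl (sep : List Char) : List Char → List (List Char)
  | [] => [[]]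
  | c :: rest =>
    if sep.isPrefixOf (c :: rest) then [] :: spl sep (rest.drop (sep.length - 1))
    else (spl sep rest).modifyHead (c :: ·)
termination_by l => l.length
decreasing_by
  · simp
  · simp

theorem spl_ne_nil (sep : List Char) (l : List Char) : spl sep l ≠ [] := by
  cases l with
  | nil => simp [spl]
  | cons c rest =>
    rw [spl]
    split
    · simp
    · rcases h : spl sep rest with _ | ⟨x, xs⟩
      · exact absurd h (by
          have := spl_ne_nil sep rest
          exact this)
      · simp

theorem go_eq (sep : List Char) (hsep : sep ≠ []) :
    ∀ (fuel : Nat) (l cur acc : _), l.length ≤ fuel →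
      PySem.Chars.splitOn.go sep fuel l cur acc
        = acc.reverse ++ (cur.reverse ++ (spl sep l).head!) :: (spl sep l).tail := by
  intro fuel
  induction fuel with
  | zero =>
    intro l cur acc hl
    have : l = [] := by cases l <;> simp_all
    subst this
    simp [PySem.Chars.splitOn.go, spl]
  | succ fuel ih =>
    intro l cur acc hl
    cases l with
    | nil => simp [PySem.Chars.splitOn.go, spl]
    | cons c rest =>
      rw [PySem.Chars.splitOn.go]
      by_cases hp : sep.isPrefixOf (c :: rest)
      · rw [if_pos hp]
        have hdrop : (c :: rest).drop sep.length = rest.drop (sep.length - 1) := by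
          cases sep with
          | nil => exact absurd rfl hsep
          | cons s ss => simp
        rw [hdrop, ih _ _ _ (by simp at hl ⊢; omega)]
        rw [spl, if_pos hp]
        have hne := spl_ne_nil sep (rest.drop (sep.length - 1))
        rcases h : spl sep (rest.drop (sep.length - 1)) with _ | ⟨x, xs⟩
        · exact absurd h hne
        · simp
      · rw [if_neg hp, ih _ _ _ (by simp at hl ⊢; omega)]
        rw [spl, if_neg hp]
        have hne := spl_ne_nil sep rest
        rcases h : spl sep rest with _ | ⟨x, xs⟩
        · exact absurd h hne
        · simp

theorem splitOn_eq_spl (l sep : List Char) (hsep : sep ≠ []) :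
    PySem.Chars.splitOn l sep = spl sep l := by
  rw [PySem.Chars.splitOn, go_eq sep hsep _ _ _ _ (by omega)]
  have hne := spl_ne_nil sep l
  rcases h : spl sep l with _ | ⟨x, xs⟩
  · exact absurd h hne
  · simp

-- A's machine restated on the remaining suffix of the text
def mach (d : List Char) : List Char → List Char → List (List Char) × List Char
  | cur, [] => ([], cur)
  | cur, [c] =>
    if [c] = d then (cur :: (mach d [] []).1, (mach d [] []).2)
    else mach d (cur ++ [c]) []
  | cur, c :: c2 :: rest2 =>
    if [c] = d then
      if [c2] = d then mach d (cur ++ d) rest2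
      else (cur :: (mach d [] (c2 :: rest2)).1, (mach d [] (c2 :: rest2)).2)
    else mach d (cur ++ [c]) (c2 :: rest2)
termination_by _ l => l.length

theorem mach_nil (d cur : List Char) : mach d cur [] = ([], cur) := by simp [mach]

theorem mach_pair (d cur : List Char) (c c2 : Char) (r : List Char) (hc : [c] = d)
    (hc2 : [c2] = d) : mach d cur (c :: c2 :: r) = mach d (cur ++ d) r := by
  rw [mach, if_pos hc, if_pos hc2]

theorem mach_sep2 (d cur : List Char) (c c2 : Char) (r : List Char) (hc : [c] = d)
    (hc2 : ¬ [c2] = d) :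
    mach d cur (c :: c2 :: r) = (cur :: (mach d [] (c2 :: r)).1, (mach d [] (c2 :: r)).2) := by
  rw [mach, if_pos hc, if_neg hc2]

theorem mach_sep1 (d cur : List Char) (c : Char) (hc : [c] = d) :
    mach d cur [c] = (cur :: (mach d [] []).1, (mach d [] []).2) := by
  rw [mach.eq_2, if_pos hc]

theorem mach_other (d cur : List Char) (c : Char) (r : List Char) (hc : ¬ [c] = d) :
    mach d cur (c :: r) = mach d (cur ++ [c]) r := by
  cases r with
  | nil => rw [mach.eq_2, if_neg hc]
  | cons a b => rw [mach.eq_3, if_neg hc]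

theorem aLoop_eq_mach (text : List Char) (delimiter : String) :
    ∀ (n idx : Nat) (tk : List (List Char)) (cur : List Char), text.length - idx ≤ n →
      aLoop text delimiter idx tk cur
        = (tk ++ (mach delimiter.toList cur (text.drop idx)).1,
           (mach delimiter.toList cur (text.drop idx)).2) := by
  intro n
  induction n with
  | zero =>
    intro idx tk cur hn
    have h : ¬ idx < text.length := by omega
    rw [aLoop, dif_neg h, List.drop_eq_nil_of_le (by omega), mach_nil]
    simp
  | succ n ih =>
    intro idx tk cur hn
    by_cases h : idx < text.length
    · rw [aLoop, dif_pos h]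
      have hd : text.drop idx = text[idx] :: text.drop (idx + 1) :=
        List.drop_eq_getElem_cons h
      have hgd : text[idx]?.getD ' ' = text[idx] := by
        simp [List.getElem?_eq_getElem h]
      by_cases hc : [text[idx]] = delimiter.toList
      · simp only [List.getD, hgd, if_pos hc]
        by_cases h2 : idx + 1 < text.length
        · have hd2 : text.drop (idx + 1) = text[idx+1] :: text.drop (idx + 2) :=
            List.drop_eq_getElem_cons h2
          have hgd2 : text[idx+1]?.getD ' ' = text[idx+1] := by
            simp [List.getElem?_eq_getElem h2]
          by_cases hc2 : [text[idx+1]] = delimiter.toList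
          · rw [if_pos (by simp [List.getD, h2, hgd2, hc2])]
            rw [ih (idx + 2) tk (cur ++ delimiter.toList) (by omega)]
            rw [hd, hd2, mach_pair _ _ _ _ _ hc hc2]
          · rw [if_neg (by simp [List.getD, hgd2, hc2])]
            rw [ih (idx + 1) (tk ++ [cur]) [] (by omega)]
            rw [hd, hd2, mach_sep2 _ _ _ _ _ hc hc2, ← hd2]
            simp
        · have hd2 : text.drop (idx + 1) = [] := List.drop_eq_nil_of_le (by omega)
          rw [if_neg (by simp [h2])]
          rw [ih (idx + 1) (tk ++ [cur]) [] (by omega)]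
          rw [hd, hd2, mach_sep1 _ _ _ hc, mach_nil]
          simp
      · simp only [List.getD, hgd, if_neg hc]
        rw [ih (idx + 1) tk (cur ++ [text[idx]]) (by omega)]
        rw [hd, mach_other _ _ _ _ hc]
    · rw [aLoop, dif_neg h, List.drop_eq_nil_of_le (by omega), mach_nil]
      simp

theorem getLast!_cons_ne (x : List Char) (s : List (List Char)) (h : s ≠ []) :
    (x :: s).getLast! = s.getLast! := by
  cases s with
  | nil => exact absurd rfl h
  | cons y t => simp [List.getLast?_cons_cons]

theorem modifyHead_modifyHead (f g : List Char → List Char) (l : List (List Char)) :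
    (l.modifyHead g).modifyHead f = l.modifyHead (fun x => f (g x)) := by
  cases l <;> simp

theorem mach_cur (d : List Char) :
    ∀ (n : Nat) (l cur : List Char), l.length ≤ n →
      (mach d cur l).1 ++ [(mach d cur l).2]
        = ((mach d [] l).1 ++ [(mach d [] l).2]).modifyHead (cur ++ ·) := by
  intro n
  induction n with
  | zero =>
    intro l cur hl
    have : l = [] := by cases l <;> simp_all
    subst this
    simp [mach_nil]
  | succ n ih =>
    intro l cur hl
    match l with
    | [] => simp [mach_nil]
    | [c] =>
      by_cases hc : [c] = d
      · rw [mach_sep1 _ _ _ hc, mach_sep1 _ _ _ hc]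
        simp [mach_nil]
      · rw [mach_other _ _ _ _ hc, mach_other _ _ _ _ hc, mach_nil, mach_nil]
        simp
    | c :: c2 :: r =>
      by_cases hc : [c] = d
      · by_cases hc2 : [c2] = d
        · rw [mach_pair _ _ _ _ _ hc hc2, mach_pair _ _ _ _ _ hc hc2]
          rw [ih r (cur ++ d) (by simp at hl; omega), ih r ([] ++ d) (by simp at hl; omega)]
          rw [modifyHead_modifyHead]
          simp [List.append_assoc]
        · rw [mach_sep2 _ _ _ _ _ hc hc2, mach_sep2 _ _ _ _ _ hc hc2]
          simp
      · rw [mach_other _ _ _ _ hc, mach_other _ _ _ _ hc]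
        rw [ih (c2 :: r) (cur ++ [c]) (by simp at hl ⊢; omega),
            ih (c2 :: r) ([] ++ [c]) (by simp at hl ⊢; omega)]
        rw [modifyHead_modifyHead]
        simp [List.append_assoc]

-- the token list A produces (before filtering), as a function of the text
def aTok (d : List Char) (l : List Char) : List (List Char) :=
  (mach d [] l).1 ++ [(mach d [] l).2]

theorem aTok_cur (d l cur : List Char) :
    (mach d cur l).1 ++ [(mach d cur l).2] = (aTok d l).modifyHead (cur ++ ·) :=
  mach_cur d l.length l cur le_rfl

theorem mach_ne_single (d : List Char) (hd : d.length ≠ 1) :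
    ∀ (l cur : List Char), mach d cur l = ([], cur ++ l) := by
  intro l
  induction l with
  | nil => intro cur; simp [mach_nil]
  | cons c r ih =>
    intro cur
    have hc : ¬ [c] = d := fun h => hd (by rw [← h]; rfl)
    rw [mach_other _ _ _ _ hc, ih]
    simp

theorem aTok_nil (d : List Char) : aTok d [] = [[]] := by simp [aTok, mach_nil]

theorem aTok_other (dc : Char) (c : Char) (rest : List Char) (hc : ¬ c = dc) :
    aTok [dc] (c :: rest) = (aTok [dc] rest).modifyHead (c :: ·) := by
  rw [aTok, mach_other _ _ _ _ (by simpa using hc), aTok_cur]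
  rfl

theorem aTok_pair (dc : Char) (r : List Char) :
    aTok [dc] (dc :: dc :: r) = (aTok [dc] r).modifyHead (dc :: ·) := by
  rw [aTok, mach_pair _ _ _ _ _ rfl rfl, aTok_cur]
  rfl

theorem aTok_sep1 (dc : Char) : aTok [dc] [dc] = [[], []] := by
  rw [aTok, mach_sep1 _ _ _ rfl, mach_nil]
  rfl

theorem aTok_sep2 (dc : Char) (c2 : Char) (r : List Char) (hc2 : ¬ c2 = dc) :
    aTok [dc] (dc :: c2 :: r) = [] :: aTok [dc] (c2 :: r) := by
  rw [aTok, mach_sep2 _ _ _ _ _ rfl (by simpa using hc2)]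
  rfl

-- bFuse with splitOn replaced by the clean splitter
def sFuse (d : List Char) (merged : List (List Char)) (seg : List Char) : List (List Char) :=
  merged.dropLast ++ [merged.getLast! ++ d ++ (spl d seg).head!] ++ (spl d seg).tail

theorem bFuse_eq_sFuse (d : List Char) (hd : d ≠ []) : bFuse d = sFuse d := by
  funext m seg
  rw [bFuse, sFuse, splitOn_eq_spl _ _ hd]

theorem sFuse_ne_nil' (d : List Char) (m : List (List Char)) (seg : List Char) :
    sFuse d m seg ≠ [] := by simp [sFuse]

theorem sFuse_cons (d : List Char) (x : List Char) (s : List (List Char)) (seg : List Char)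
    (h : s ≠ []) : sFuse d (x :: s) seg = x :: sFuse d s seg := by
  rw [sFuse, sFuse, List.dropLast_cons_of_ne_nil h, getLast!_cons_ne _ _ h]
  simp

theorem foldl_sFuse_cons (d : List Char) (x : List Char) :
    ∀ (ss : List (List Char)) (s : List (List Char)), s ≠ [] →
      ss.foldl (sFuse d) (x :: s) = x :: ss.foldl (sFuse d) s := by
  intro ss
  induction ss with
  | nil => intro s h; rfl
  | cons seg ss ih =>
    intro s h
    rw [List.foldl_cons, List.foldl_cons, sFuse_cons _ _ _ _ h, ih _ (sFuse_ne_nil' d s seg)]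

theorem sFuse_modifyHead (d : List Char) (x : List Char) (m : List (List Char)) (seg : List Char)
    (h : m ≠ []) :
    sFuse d (m.modifyHead (x ++ ·)) seg = (sFuse d m seg).modifyHead (x ++ ·) := by
  match m with
  | [] => exact absurd rfl h
  | [y] => simp [sFuse, List.append_assoc]
  | y :: z :: s =>
    simp only [List.modifyHead_cons]
    rw [sFuse_cons d (x ++ y) (z :: s) seg (by simp), sFuse_cons d y (z :: s) seg (by simp)]
    simp

theorem foldl_sFuse_modifyHead (d : List Char) (x : List Char) :
    ∀ (ss : List (List Char)) (m : List (List Char)), m ≠ [] →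
      ss.foldl (sFuse d) (m.modifyHead (x ++ ·)) = (ss.foldl (sFuse d) m).modifyHead (x ++ ·) := by
  intro ss
  induction ss with
  | nil => intro m h; rfl
  | cons seg ss ih =>
    intro m h
    rw [List.foldl_cons, List.foldl_cons, sFuse_modifyHead _ _ _ _ h,
        ih _ (sFuse_ne_nil' d m seg)]

-- B's merged list, as a function of the text (single-character delimiter [dc])
def mrg (dc : Char) (l : List Char) : List (List Char) :=
  ((spl [dc, dc] l).tail).foldl (sFuse [dc]) (spl [dc] ((spl [dc, dc] l).head!))

theorem spl1_nil (dc : Char) : spl [dc] [] = [[]] := by simp [spl]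

theorem spl1_d (dc : Char) (r : List Char) : spl [dc] (dc :: r) = [] :: spl [dc] r := by
  rw [spl]
  simp [List.isPrefixOf]

theorem spl1_ne (dc c : Char) (r : List Char) (hc : ¬ c = dc) :
    spl [dc] (c :: r) = (spl [dc] r).modifyHead (c :: ·) := by
  rw [spl]
  simp [List.isPrefixOf, Ne.symm hc]

theorem spl2_nil (dc : Char) : spl [dc, dc] [] = [[]] := by simp [spl]

theorem spl2_dd (dc : Char) (r : List Char) :
    spl [dc, dc] (dc :: dc :: r) = [] :: spl [dc, dc] r := by
  rw [spl]
  simp [List.isPrefixOf]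

theorem spl2_not (dc c : Char) (r : List Char) (h : ¬ ([dc, dc].isPrefixOf (c :: r) = true)) :
    spl [dc, dc] (c :: r) = (spl [dc, dc] r).modifyHead (c :: ·) := by
  rw [spl]
  simp [h]

theorem mrg_nil (dc : Char) : mrg dc [] = [[]] := by
  rw [mrg, spl2_nil]
  simp [spl1_nil]

theorem spl_cons_exists (sep l : List Char) : ∃ h ss, spl sep l = h :: ss := by
  cases e : spl sep l with
  | nil => exact absurd e (spl_ne_nil _ _)
  | cons h ss => exact ⟨h, ss, rfl⟩

theorem mrg_other (dc c : Char) (rest : List Char) (hc : ¬ c = dc) :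
    mrg dc (c :: rest) = (mrg dc rest).modifyHead (c :: ·) := by
  obtain ⟨h, ss, hsplit⟩ := spl_cons_exists [dc, dc] rest
  rw [mrg, spl2_not dc c rest (by simp [List.isPrefixOf, Ne.symm hc]), hsplit]
  simp only [List.modifyHead_cons, List.tail_cons, List.head!_cons]
  rw [spl1_ne dc c h hc]
  rw [show (spl [dc] h).modifyHead (c :: ·) = (spl [dc] h).modifyHead ([c] ++ ·) from rfl]
  rw [foldl_sFuse_modifyHead [dc] [c] ss (spl [dc] h) (spl_ne_nil _ _)]
  rw [mrg, hsplit]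
  rfl

theorem sFuse_base (d : List Char) (seg : List Char) :
    sFuse d [[]] seg = (spl d seg).modifyHead (d ++ ·) := by
  obtain ⟨y, t, hsp⟩ := spl_cons_exists d seg
  rw [sFuse, hsp]
  simp

theorem mrg_pair (dc : Char) (r : List Char) :
    mrg dc (dc :: dc :: r) = (mrg dc r).modifyHead (dc :: ·) := by
  obtain ⟨h, ss, hsplit⟩ := spl_cons_exists [dc, dc] r
  rw [mrg, spl2_dd, hsplit]
  simp only [List.tail_cons, List.head!_cons]
  rw [spl1_nil, List.foldl_cons, sFuse_base]
  rw [show (spl [dc] h).modifyHead ([dc] ++ ·) = (spl [dc] h).modifyHead ((fun x => dc :: x) : List Char → List Char) from rfl]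
  rw [show ((fun x => dc :: x) : List Char → List Char) = (fun x => [dc] ++ x) from rfl]
  rw [foldl_sFuse_modifyHead [dc] [dc] ss (spl [dc] h) (spl_ne_nil _ _)]
  rw [mrg, hsplit]
  rfl

theorem mrg_sep (dc : Char) (rest : List Char)
    (h : ¬ ([dc, dc].isPrefixOf (dc :: rest) = true)) :
    mrg dc (dc :: rest) = [] :: mrg dc rest := by
  obtain ⟨hh, ss, hsplit⟩ := spl_cons_exists [dc, dc] rest
  rw [mrg, spl2_not dc dc rest h, hsplit]
  simp only [List.modifyHead_cons, List.tail_cons, List.head!_cons]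
  rw [spl1_d, foldl_sFuse_cons [dc] [] ss (spl [dc] hh) (spl_ne_nil _ _)]
  rw [mrg, hsplit]
  rfl

theorem aTok_eq_mrg (dc : Char) :
    ∀ (n : Nat) (l : List Char), l.length ≤ n → aTok [dc] l = mrg dc l := by
  intro n
  induction n with
  | zero =>
    intro l hl
    have : l = [] := by cases l <;> simp_all
    subst this
    rw [aTok_nil, mrg_nil]
  | succ n ih =>
    intro l hl
    match l with
    | [] => rw [aTok_nil, mrg_nil]
    | c :: rest =>
      by_cases hc : c = dc
      · subst hc
        match rest with
        | [] =>
          rw [aTok_sep1, mrg_sep c [] (by simp [List.isPrefixOf]), mrg_nil]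
        | c2 :: r =>
          by_cases hc2 : c2 = c
          · subst hc2
            rw [aTok_pair, mrg_pair, ih r (by simp at hl; omega)]
          · rw [aTok_sep2 c c2 r (by simpa using hc2),
                mrg_sep c (c2 :: r) (by simp [List.isPrefixOf, Ne.symm hc2]),
                ih (c2 :: r) (by simp at hl ⊢; omega)]
      · rw [aTok_other dc c rest (by simpa using hc), mrg_other dc c rest (by simpa using hc),
            ih rest (by simp at hl; omega)]

theorem filter_snoc_curr (tk : List (List Char)) (c : List Char) :
    (if !c.isEmpty then tk ++ [c] else tk).filter (fun t => !t.isEmpty)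
      = (tk ++ [c]).filter (fun t => !t.isEmpty) := by
  by_cases h : c = []
  · subst h; simp
  · simp [h]

theorem A_as_aTok (text : String) (delimiter : String) :
    split_fcs_text_tokens_py text delimiter
      = ((aTok delimiter.toList text.toList).filter (fun t => !t.isEmpty)).map String.ofList := by
  rw [split_fcs_text_tokens_py]
  have h := aLoop_eq_mach text.toList delimiter text.toList.length 0 [] [] (by omega)
  rw [List.drop_zero] at h
  rw [h]
  simp only [List.nil_append]
  rw [filter_snoc_curr, aTok]

theorem main_eq (text : String) (delimiter : String) :
    split_fcs_text_tokens_py text delimiter = split_fcs_text_tokens_py_alt text delimiter := by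
  rw [A_as_aTok, split_fcs_text_tokens_py_alt]
  by_cases hlen : delimiter.toList.length = 1
  · rw [if_pos (by simp only [PySem.Str.len_eq]; exact_mod_cast hlen)]
    obtain ⟨dc, hdl⟩ := List.length_eq_one_iff.mp hlen
    simp only [hdl]
    rw [show ([dc] ++ [dc] : List Char) = [dc, dc] from rfl]
    rw [splitOn_eq_spl text.toList [dc, dc] (by simp), bFuse_eq_sFuse _ (by simp)]
    obtain ⟨hh, ss, hsplit⟩ := spl_cons_exists [dc, dc] text.toList
    rw [hsplit]
    simp only [List.tail_cons, List.head!_cons]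
    rw [splitOn_eq_spl hh [dc] (by simp)]
    have : (ss.foldl (sFuse [dc]) (spl [dc] hh)) = mrg dc text.toList := by
      rw [mrg, hsplit]
      simp only [List.tail_cons, List.head!_cons]
    rw [this, aTok_eq_mrg dc text.toList.length text.toList le_rfl]
  · rw [if_neg (by simp only [PySem.Str.len_eq]; intro e; exact hlen (by exact_mod_cast e))]
    have hm : mach delimiter.toList [] text.toList = ([], text.toList) :=
      mach_ne_single delimiter.toList hlen text.toList []
    rw [aTok, hm]
    by_cases ht : text = ""
    · subst ht
      simp
    · rw [if_neg ht]
      have htl : ¬ text.toList = [] := by simpa using ht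
      simp [htl]

-- ===== VERDICT (by name: the statement is the Claim_ definition above) =====
theorem split_fcs_text_tokens_py_spec : Claim_equal_split_fcs_text_tokens_py := by
  intro text delimiter _
  unfold Spec_split_fcs_text_tokens_py
  exact main_eq text delimiter
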